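-- pv_equiv track=rewrite | github.com/Seidr-Edu/Heimdall | src/heimdall/simpleyaml.py | _looks_like_inline_mapping
-- ===== SOURCE A (Python) =====
-- def _looks_like_inline_mapping(value: str) -> bool:
--     in_single = False
--     in_double = False
--     for idx, char in enumerate(value):
--         if char == "'" and not in_double:
--             in_single = not in_single
--         elif char == '"' and not in_single:
--             in_double = not in_double
--         elif char == ":" and not in_single and not in_double:
--             return idx > 0
--     return False
-- ===== SOURCE B (Python) =====
-- def _looks_like_inline_mapping(value: str) -> bool:
--     i = 0
--     n = len(value)
--     while i < n:
--         c = value[i]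
--         if c == "'":
--             j = value.find("'", i + 1)
--             if j == -1:
--                 return False
--             i = j + 1
--         elif c == '"':
--             j = value.find('"', i + 1)
--             if j == -1:
--                 return False
--             i = j + 1
--         elif c == ':':
--             return i > 0
--         else:
--             i += 1
--     return False
-- ===== Notes on version B (the rewrite author's own statement) =====
-- stated objective: alternative
-- what changed: Replaces the two quote-state toggle flags with an index loop that jumps over entire quoted spans via str.find, returning i>0 at the first unquoted colon.
import Mathlib
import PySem

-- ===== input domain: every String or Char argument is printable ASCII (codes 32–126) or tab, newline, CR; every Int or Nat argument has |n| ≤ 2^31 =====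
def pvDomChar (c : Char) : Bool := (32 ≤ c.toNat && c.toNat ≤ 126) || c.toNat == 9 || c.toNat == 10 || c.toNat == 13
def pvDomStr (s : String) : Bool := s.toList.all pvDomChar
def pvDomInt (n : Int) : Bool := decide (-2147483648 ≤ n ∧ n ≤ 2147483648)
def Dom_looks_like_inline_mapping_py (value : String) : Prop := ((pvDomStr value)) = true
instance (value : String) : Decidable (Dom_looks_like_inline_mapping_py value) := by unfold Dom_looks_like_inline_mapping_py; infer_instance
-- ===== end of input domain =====

-- B replaces A's two quote-state toggle flags with an index loop that jumps over whole
-- quoted spans (via a find-next-quote scan), returning i>0 at the first unquoted colon.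

-- ===== PORT A =====
-- the for-loop of A: state = (in_single, in_double), idx carried along
def llimA : List Char → Nat → Bool → Bool → Bool
  | [], _, _, _ => false
  | c :: rest, idx, s, d =>
    if c = '\'' ∧ d = false then llimA rest (idx + 1) (!s) d
    else if c = '"' ∧ s = false then llimA rest (idx + 1) s (!d)
    else if c = ':' ∧ s = false ∧ d = false then decide (idx > 0)
    else llimA rest (idx + 1) s d

def looks_like_inline_mapping_py (value : String) : Bool :=
  llimA value.toList 0 false false

-- ===== PORT B =====
-- value.find(q, i+1): scan the tail for q; on success return the remaining tail and the
-- index just past the found quote (B's 'i = j + 1'); none = find returned -1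
def llimFind : List Char → Char → Nat → Option (List Char × Nat)
  | [], _, _ => none
  | c :: rest, q, i => if c = q then some (rest, i + 1) else llimFind rest q (i + 1)

theorem llimFind_length_lt {l : List Char} {q : Char} {i : Nat} {r : List Char} {j : Nat}
    (h : llimFind l q i = some (r, j)) : r.length < l.length := by
  induction l generalizing i with
  | nil => simp [llimFind] at h
  | cons c rest ih =>
    by_cases hc : c = q
    · simp [llimFind, hc] at h
      simp [h.1]
    · simp [llimFind, hc] at h
      exact Nat.lt_trans (ih h) (by simp)

-- B's while loop over index i
def llimB : List Char → Nat → Bool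
  | [], _ => false
  | c :: rest, i =>
    if c = '\'' then
      match h : llimFind rest '\'' (i + 1) with
      | none => false
      | some (r, j) => llimB r j
    else if c = '"' then
      match h : llimFind rest '"' (i + 1) with
      | none => false
      | some (r, j) => llimB r j
    else if c = ':' then decide (i > 0)
    else llimB rest (i + 1)
  termination_by l _ => l.length
  decreasing_by
  · exact Nat.lt_trans (llimFind_length_lt h) (by simp)
  · exact Nat.lt_trans (llimFind_length_lt h) (by simp)
  · simp

def looks_like_inline_mapping_py_alt (value : String) : Bool :=
  llimB value.toList 0

-- ===== PRECONDITION & SPEC =====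
def Spec_looks_like_inline_mapping_py (value : String) (out : Bool) : Prop := out = looks_like_inline_mapping_py_alt value
instance (value : String) (out : Bool) : Decidable (Spec_looks_like_inline_mapping_py value out) := by unfold Spec_looks_like_inline_mapping_py; infer_instance

-- ===== CLAIM (what is proved, stated in full; the proofs are below) =====
def Claim_equal_looks_like_inline_mapping_py : Prop := ∀ (value : String), Dom_looks_like_inline_mapping_py value → Spec_looks_like_inline_mapping_py value (looks_like_inline_mapping_py value)

-- ===== LEMMAS AND PROOFS =====

-- inside a single-quoted span, A scans exactly to the closing quote and resets its state
theorem llimA_single (l : List Char) : ∀ idx : Nat,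
    llimA l idx true false =
      (match llimFind l '\'' idx with
       | none => false
       | some (r, j) => llimA r j false false) := by
  induction l with
  | nil => intro idx; simp [llimA, llimFind]
  | cons c rest ih =>
    intro idx
    by_cases hc : c = '\''
    · simp [llimA, llimFind, hc]
    · have hq : ¬ (c = '"' ∧ True = False) := by simp
      simp [llimA, llimFind, hc, ih]

-- inside a double-quoted span, symmetrically
theorem llimA_double (l : List Char) : ∀ idx : Nat,
    llimA l idx false true =
      (match llimFind l '"' idx with
       | none => false
       | some (r, j) => llimA r j false false) := by
  induction l with
  | nil => intro idx; simp [llimA, llimFind]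
  | cons c rest ih =>
    intro idx
    by_cases hc : c = '"'
    · simp [llimA, llimFind, hc]
    · simp [llimA, llimFind, hc, ih]

theorem llimA_eq_llimB (n : Nat) : ∀ l : List Char, l.length ≤ n → ∀ i : Nat,
    llimA l i false false = llimB l i := by
  induction n with
  | zero =>
    intro l hl i
    have : l = [] := List.eq_nil_of_length_eq_zero (Nat.le_zero.mp hl)
    simp [this, llimA, llimB]
  | succ n ih =>
    intro l hl i
    match l with
    | [] => simp [llimA, llimB]
    | c :: rest =>
      by_cases hs : c = '\''
      · rw [llimB]
        simp only [hs]
        subst hs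
        have hA : llimA ('\'' :: rest) i false false = llimA rest (i + 1) true false := by
          simp [llimA]
        rw [hA, llimA_single, if_pos trivial]
        cases hf : llimFind rest '\'' (i + 1) with
        | none => simp
        | some rj =>
          obtain ⟨r, j⟩ := rj
          have hr : r.length ≤ n := by
            have h1 := llimFind_length_lt hf
            simp only [List.length_cons] at hl
            omega
          simp [ih r hr j]
      · by_cases hd : c = '"'
        · rw [llimB]
          simp only [hd]
          subst hd
          have hA : llimA ('"' :: rest) i false false = llimA rest (i + 1) false true := by
            simp [llimA]
          have hq : ¬ ('"' = '\'') := by decide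
          rw [hA, llimA_double, if_neg hq, if_pos trivial]
          cases hf : llimFind rest '"' (i + 1) with
          | none => simp
          | some rj =>
            obtain ⟨r, j⟩ := rj
            have hr : r.length ≤ n := by
              have h1 := llimFind_length_lt hf
              simp only [List.length_cons] at hl
              omega
            simp [ih r hr j]
        · by_cases hcolon : c = ':'
          · simp [llimA, llimB, hcolon]
          · have hrest : rest.length ≤ n := by
              simp at hl; omega
            simp [llimA, llimB, hs, hd, hcolon, ih rest hrest (i + 1)]

-- ===== VERDICT (by name: the statement is the Claim_ definition above) =====
theorem looks_like_inline_mapping_py_spec : Claim_equal_looks_like_inline_mapping_py := by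
  intro value _
  unfold Spec_looks_like_inline_mapping_py looks_like_inline_mapping_py looks_like_inline_mapping_py_alt
  exact llimA_eq_llimB value.toList.length value.toList (le_refl _) 0
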